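-- pv_equiv track=rewrite | github.com/shahed-shd/Online-Judge-Solutions | Codeforces/771A - Bear and Friendship Condition.py | bfs
-- ===== SOURCE A (Python) =====
-- import collections
--
-- def bfs(u, adjList, vis):
--     dq = collections.deque()
--
--     dq.append(u)
--     vis[u] = True
--     edgeCnt = 0
--     vertexCnt = 0
--
--     while dq:
--         u = dq.popleft()
--
--         vertexCnt += 1
--         edgeCnt += len(adjList[u])
--
--         for v in adjList[u]:
--             if not vis[v]:
--                 vis[v] = True
--                 dq.append(v)
--
--     edgeCnt = edgeCnt // 2
--     return bool(edgeCnt == ((vertexCnt * vertexCnt - vertexCnt) // 2))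
-- ===== SOURCE B (Python) =====
-- def bfs(u, adjList, vis):
--     # Level-by-level frontier expansion building the component as a set
--     # (no queue, no mutation of vis), then count vertices/edges in one pass.
--     comp = {u}
--     frontier = {u}
--     while frontier:
--         frontier = {v for w in frontier for v in adjList[w]
--                     if v not in comp and not vis[v]}
--         comp |= frontier
--     n = len(comp)
--     e = sum(len(adjList[w]) for w in comp)
--     return bool(e // 2 == (n * n - n) // 2)
-- ===== Notes on version B (the rewrite author's own statement) =====
-- stated objective: alternative
-- what changed: A runs a deque BFS that mutates vis and accumulates vertex/edge counts while popping; B instead computes the component as a set by level-by-level frontier expansion (set comprehensions, no queue, vis left unmutated) and only afterwards counts vertices and sums degrees in one pass over the component.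
import Mathlib
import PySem

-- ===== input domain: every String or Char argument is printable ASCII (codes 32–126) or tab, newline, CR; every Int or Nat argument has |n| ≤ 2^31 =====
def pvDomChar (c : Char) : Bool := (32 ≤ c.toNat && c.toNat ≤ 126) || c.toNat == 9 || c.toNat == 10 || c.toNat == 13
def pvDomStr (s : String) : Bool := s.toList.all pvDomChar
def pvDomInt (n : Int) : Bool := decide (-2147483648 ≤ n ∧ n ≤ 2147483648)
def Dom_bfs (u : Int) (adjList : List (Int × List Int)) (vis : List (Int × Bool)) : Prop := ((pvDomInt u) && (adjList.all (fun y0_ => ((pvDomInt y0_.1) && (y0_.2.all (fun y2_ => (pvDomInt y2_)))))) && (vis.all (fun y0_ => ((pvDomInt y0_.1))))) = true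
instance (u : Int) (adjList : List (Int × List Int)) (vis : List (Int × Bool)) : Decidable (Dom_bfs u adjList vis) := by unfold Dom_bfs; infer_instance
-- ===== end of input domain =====

-- B replaces A's counting deque-BFS by a frontier-set fixpoint plus a separate counting pass (objective: alternative).
-- Python A mutates `vis` in place; B does not — the equivalence proved here is about the return value only.

-- ===== PORT A =====
-- adjList[w]; a missing key raises KeyError in Python, excluded by Pre_bfs (the default [] makes the port total)
def bfsAdj (adjList : List (Int × List Int)) (w : Int) : List Int :=
  ((PySem.Dict.mk adjList).get? w).getD []

-- the `for v in adjList[u]` body: `if not vis[v]: vis[v] = True; dq.append(v)`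
-- (`vis[v]` on a missing key raises KeyError in Python, excluded by Pre_bfs; the default `true` makes the port total)
def bfsVisit (vis : PySem.Dict Int Bool) (dq : List Int) (ns : List Int) :
    PySem.Dict Int Bool × List Int :=
  ns.foldl (fun st v =>
    if (st.1.get? v).getD true = false then (st.1.insert v true, st.2 ++ [v]) else st) (vis, dq)

-- termination helper for the `while dq:` loop: number of entries of vis holding false
def bfsFalse (vis : PySem.Dict Int Bool) : Nat :=
  vis.items.countP (fun p => p.2 == false)

theorem bfsFalse_map_le (v : Int) (l : List (Int × Bool)) :
    (l.map (fun p => if p.1 == v then (v, true) else p)).countP (fun p => p.2 == false)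
      ≤ l.countP (fun p => p.2 == false) := by
  induction l with
  | nil => simp
  | cons a t ih =>
    simp only [List.map_cons, List.countP_cons]
    split
    · simp_all
      omega
    · simp_all

theorem bfsFalse_insert_lt (d : PySem.Dict Int Bool) (v : Int)
    (h : d.get? v = some false) : bfsFalse (d.insert v true) < bfsFalse d := by
  obtain ⟨items⟩ := d
  simp only [PySem.Dict.get?, Option.map_eq_some_iff] at h
  obtain ⟨pr, hfind, hpr⟩ := h
  have hcont : (PySem.Dict.mk items).contains v = true := by
    simp only [PySem.Dict.contains, List.any_eq_true]
    obtain ⟨hk, -⟩ := List.find?_eq_some_iff_append.mp hfind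
    exact ⟨pr, List.mem_of_find?_eq_some hfind, hk⟩
  simp only [PySem.Dict.insert, hcont, if_pos, bfsFalse]
  clear hcont
  induction items with
  | nil => simp at hfind
  | cons a t ih =>
    by_cases ha : (a.1 == v) = true
    · simp only [List.find?_cons, ha] at hfind
      obtain rfl : a = pr := by injection hfind
      simp only [List.map_cons, List.countP_cons, ha, if_pos]
      have := bfsFalse_map_le v t
      simp_all
    · simp only [List.find?_cons, ha] at hfind
      have := ih hfind
      simp only [List.map_cons, List.countP_cons, if_neg ha]
      omega

theorem bfsVisit_measure (ns : List Int) : ∀ (vis : PySem.Dict Int Bool) (dq : List Int),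
    2 * bfsFalse (bfsVisit vis dq ns).1 + (bfsVisit vis dq ns).2.length
      ≤ 2 * bfsFalse vis + dq.length := by
  induction ns with
  | nil => intro vis dq; simp [bfsVisit]
  | cons v t ih =>
    intro vis dq
    simp only [bfsVisit, List.foldl_cons]
    by_cases h : ((vis.get? v).getD true = false)
    · rw [if_pos h]
      have h' : vis.get? v = some false := by
        cases hv : vis.get? v
        · simp [hv] at h
        · simp only [hv, Option.getD_some] at h; rw [h]
      have hlt := bfsFalse_insert_lt vis v h'
      have := ih (vis.insert v true) (dq ++ [v])
      simp only [bfsVisit] at this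
      simp only [List.length_append, List.length_cons, List.length_nil] at this ⊢
      omega
    · rw [if_neg h]; exact ih vis dq

-- the `while dq:` loop, with its accumulators
def bfsLoop (adjList : List (Int × List Int)) (dq : List Int)
    (vis : PySem.Dict Int Bool) (edgeCnt vertexCnt : Int) : Int × Int :=
  match dq with
  | [] => (edgeCnt, vertexCnt)
  | w :: rest =>
    let ns := bfsAdj adjList w
    let st := bfsVisit vis rest ns
    bfsLoop adjList st.2 st.1 (edgeCnt + (ns.length : Int)) (vertexCnt + 1)
termination_by 2 * bfsFalse vis + dq.length
decreasing_by
  have := bfsVisit_measure (bfsAdj adjList w) vis rest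
  simp only [List.length_cons]
  omega

def bfs (u : Int) (adjList : List (Int × List Int)) (vis : List (Int × Bool)) : Bool :=
  let vis1 := (PySem.Dict.mk vis).insert u true
  let r := bfsLoop adjList [u] vis1 0 0
  let edgeCnt := PySem.Int.floordiv r.1 2
  edgeCnt == PySem.Int.floordiv (r.2 * r.2 - r.2) 2

-- ===== PORT B =====
-- adjList[w] (missing key: KeyError in Python, excluded by Pre_bfs)
def altAdj (adjList : List (Int × List Int)) (w : Int) : List Int :=
  ((PySem.Dict.mk adjList).get? w).getD []

-- the inner `for v in adjList[w] … if v not in comp and not vis[v]` of the set comprehension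
-- (`vis[v]` on a missing key: KeyError in Python, excluded by Pre_bfs; default `true` makes the port total)
def altStep (vis0 : PySem.Dict Int Bool) (comp : PySem.Set Int)
    (acc : PySem.Set Int) (ns : List Int) : PySem.Set Int :=
  ns.foldl (fun acc v =>
    if PySem.Set.contains comp v = false ∧ (vis0.get? v).getD true = false
    then PySem.Set.add acc v else acc) acc

-- the whole set comprehension: the next frontier
def altNew (adjList : List (Int × List Int)) (vis0 : PySem.Dict Int Bool)
    (comp : PySem.Set Int) (frontier : PySem.Set Int) : PySem.Set Int :=
  frontier.foldl (fun acc w => altStep vis0 comp acc (altAdj adjList w)) PySem.Set.empty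

-- termination helper for the `while frontier:` loop: vis keys still discoverable (value false, not in comp)
def altAvail (vis : List (Int × Bool)) (comp : PySem.Set Int) : Nat :=
  ((PySem.List.dedup (vis.map Prod.fst)).filter
    (fun k => ((PySem.Dict.mk vis).get? k == some false) && !(PySem.Set.contains comp k))).length

theorem mem_altStep (vis0 : PySem.Dict Int Bool) (comp : PySem.Set Int) (ns : List Int) :
    ∀ (acc : PySem.Set Int) (x : Int), x ∈ altStep vis0 comp acc ns →
      x ∈ acc ∨ (PySem.Set.contains comp x = false ∧ vis0.get? x = some false) := by
  induction ns with
  | nil => intro acc x hx; exact Or.inl hx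
  | cons v t ih =>
    intro acc x hx
    simp only [altStep, List.foldl_cons] at hx
    by_cases h : PySem.Set.contains comp v = false ∧ (vis0.get? v).getD true = false
    · rw [if_pos h] at hx
      rcases ih _ x hx with hmem | hp
      · rcases (PySem.Set.mem_add acc v x).mp hmem with h1 | rfl
        · exact Or.inl h1
        · refine Or.inr ⟨h.1, ?_⟩
          rcases hv : vis0.get? x with _ | b
          · rw [hv] at h; simp at h
          · rw [hv] at h; rcases b <;> simp_all
      · exact Or.inr hp
    · rw [if_neg h] at hx
      exact ih _ x hx

theorem mem_altNew_aux (adjList : List (Int × List Int)) (vis0 : PySem.Dict Int Bool)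
    (comp : PySem.Set Int) (f : List Int) :
    ∀ (acc : PySem.Set Int) (x : Int),
      x ∈ f.foldl (fun acc w => altStep vis0 comp acc (altAdj adjList w)) acc →
      x ∈ acc ∨ (PySem.Set.contains comp x = false ∧ vis0.get? x = some false) := by
  induction f with
  | nil => intro acc x hx; exact Or.inl hx
  | cons w t ih =>
    intro acc x hx
    simp only [List.foldl_cons] at hx
    rcases ih _ x hx with h1 | h2
    · exact mem_altStep vis0 comp _ acc x h1
    · exact Or.inr h2

theorem mem_altNew (adjList : List (Int × List Int)) (vis0 : PySem.Dict Int Bool)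
    (comp frontier : PySem.Set Int) (x : Int) (hx : x ∈ altNew adjList vis0 comp frontier) :
    PySem.Set.contains comp x = false ∧ vis0.get? x = some false := by
  rcases mem_altNew_aux adjList vis0 comp frontier PySem.Set.empty x hx with h | h
  · simp [PySem.Set.empty] at h
  · exact h

theorem filter_length_lt {α : Type} (L : List α) (p q : α → Bool)
    (hpq : ∀ a, q a = true → p a = true) (x : α) (hx : x ∈ L)
    (hpx : p x = true) (hqx : q x = false) :
    (L.filter q).length < (L.filter p).length := by
  induction L with
  | nil => simp at hx
  | cons a t ih =>
    have hmono : (t.filter q).length ≤ (t.filter p).length := by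
      simp only [← List.countP_eq_length_filter]
      exact List.countP_mono_left (fun b _ hb => hpq b hb)
    rcases List.mem_cons.mp hx with rfl | hxt
    · simp only [List.filter_cons, hpx, hqx, Bool.false_eq_true, if_false, if_pos]
      simp only [List.length_cons]
      omega
    · have := ih hxt
      simp only [List.filter_cons]
      by_cases hqa : q a = true
      · simp only [hqa, hpq a hqa, if_pos, List.length_cons]; omega
      · rw [Bool.not_eq_true] at hqa
        simp only [hqa]
        by_cases hpa : p a = true <;> simp [hpa] <;> omega

theorem union_mono_contains (comp nf : PySem.Set Int) (k : Int)
    (h : PySem.Set.contains (PySem.Set.union comp nf) k = false) :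
    PySem.Set.contains comp k = false := by
  simp only [PySem.Set.contains, List.contains_eq_mem, decide_eq_false_iff_not] at h ⊢
  exact fun hk => h ((PySem.Set.mem_union comp nf k).mpr (Or.inl hk))

theorem altAvail_lt (vis : List (Int × Bool)) (comp nf : PySem.Set Int)
    (hmem : ∀ x ∈ nf, PySem.Set.contains comp x = false ∧
        (PySem.Dict.mk vis).get? x = some false)
    (hne : nf ≠ []) :
    altAvail vis (PySem.Set.union comp nf) < altAvail vis comp := by
  obtain ⟨x, hx⟩ : ∃ x, x ∈ nf := by
    cases nf with
    | nil => simp at hne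
    | cons a t => exact ⟨a, List.mem_cons_self⟩
  obtain ⟨hcx, hgx⟩ := hmem x hx
  refine filter_length_lt _ _ _ ?_ x ?_ ?_ ?_
  · intro a ha
    simp only [Bool.and_eq_true, beq_iff_eq, Bool.not_eq_eq_eq_not, Bool.not_true] at ha ⊢
    exact ⟨ha.1, union_mono_contains comp nf a ha.2⟩
  · rw [PySem.List.mem_dedup]
    have hgx' := hgx
    simp only [PySem.Dict.get?, Option.map_eq_some_iff] at hgx'
    obtain ⟨pr, hfind, -⟩ := hgx'
    have hmem' := List.mem_of_find?_eq_some hfind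
    have hk : pr.1 = x := by
      have := List.find?_some hfind; simpa using this
    exact hk ▸ List.mem_map_of_mem hmem'
  · simp only [Bool.and_eq_true, beq_iff_eq, Bool.not_eq_eq_eq_not, Bool.not_true]
    exact ⟨hgx, hcx⟩
  · have hcu : PySem.Set.contains (PySem.Set.union comp nf) x = true := by
      simp only [PySem.Set.contains, List.contains_eq_mem, decide_eq_true_iff]
      exact (PySem.Set.mem_union comp nf x).mpr (Or.inr hx)
    simp
    exact fun _ _ => hx

-- the `while frontier:` loop
def altLoop (adjList : List (Int × List Int)) (vis : List (Int × Bool))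
    (frontier comp : PySem.Set Int) : PySem.Set Int :=
  match frontier with
  | [] => comp
  | _ :: _ =>
    let nf := altNew adjList (PySem.Dict.mk vis) comp frontier
    altLoop adjList vis nf (PySem.Set.union comp nf)
termination_by (altAvail vis comp, frontier.length)
decreasing_by
  by_cases hnf : altNew adjList (PySem.Dict.mk vis) comp frontier = []
  · rw [hnf]
    have h0 : PySem.Set.union comp ([] : List Int) = comp := rfl
    rw [h0]
    exact Prod.Lex.right _ (by simp)
  · exact Prod.Lex.left _ _
      (altAvail_lt vis comp _ (fun x hx => mem_altNew adjList _ comp frontier x hx) hnf)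

def bfs_alt (u : Int) (adjList : List (Int × List Int)) (vis : List (Int × Bool)) : Bool :=
  let comp0 : PySem.Set Int := PySem.Set.add PySem.Set.empty u
  let comp := altLoop adjList vis comp0 comp0
  let n : Int := (comp.length : Int)
  let e : Int := (comp.map (fun w => ((altAdj adjList w).length : Int))).sum
  PySem.Int.floordiv e 2 == PySem.Int.floordiv (n * n - n) 2

-- ===== PRECONDITION & SPEC =====
-- Pre_bfs is the exact domain of Python A, which raises KeyError iff some vertex it pops is
-- missing from adjList, or some neighbour of a popped vertex is missing from vis (unless that
-- neighbour is u, which A marks unconditionally).  The popped vertices are u plus the vertices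
-- reachable from u through neighbours whose vis entry is False; that closure is the fixpoint of
-- one expansion step, reached after at most vis.length productive steps.
def pvNbrs (adjList : List (Int × List Int)) (w : Int) : List Int :=
  ((PySem.Dict.mk adjList).get? w).getD []
def pvExpand (adjList : List (Int × List Int)) (vis : List (Int × Bool))
    (S : List Int) : List Int :=
  PySem.List.dedup (S ++ S.flatMap (fun w => (pvNbrs adjList w).filter
    (fun v => (PySem.Dict.mk vis).get? v == some false)))
def pvPopped (adjList : List (Int × List Int)) (vis : List (Int × Bool)) (u : Int) : List Int :=
  (pvExpand adjList vis)^[vis.length + 1] [u]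
def Pre_bfs (u : Int) (adjList : List (Int × List Int)) (vis : List (Int × Bool)) : Prop :=
  ∀ w ∈ pvPopped adjList vis u, w ∈ adjList.map Prod.fst ∧
    ∀ v ∈ pvNbrs adjList w, v ∈ vis.map Prod.fst ∨ v = u
instance (u : Int) (adjList : List (Int × List Int)) (vis : List (Int × Bool)) :
    Decidable (Pre_bfs u adjList vis) := by unfold Pre_bfs; infer_instance

def pvWitness_bfs : Int × (List (Int × List Int)) × (List (Int × Bool)) :=
  (0, [(0, [1]), (1, [0])], [(0, false), (1, false)])

def Spec_bfs (u : Int) (adjList : List (Int × List Int)) (vis : List (Int × Bool)) (out : Bool) : Prop := out = bfs_alt u adjList vis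
instance (u : Int) (adjList : List (Int × List Int)) (vis : List (Int × Bool)) (out : Bool) : Decidable (Spec_bfs u adjList vis out) := by unfold Spec_bfs; infer_instance

-- ===== CLAIM (what is proved, stated in full; the proofs are below) =====
def Claim_equal_bfs : Prop := ∀ (u : Int) (adjList : List (Int × List Int)) (vis : List (Int × Bool)), Dom_bfs u adjList vis → Pre_bfs u adjList vis → Spec_bfs u adjList vis (bfs u adjList vis)

-- ===== LEMMAS AND PROOFS =====

theorem nodup_altStep (vis0 : PySem.Dict Int Bool) (comp : PySem.Set Int) (ns : List Int) :
    ∀ (acc : PySem.Set Int), acc.Nodup → (altStep vis0 comp acc ns).Nodup := by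
  induction ns with
  | nil => intro acc h; exact h
  | cons v t ih =>
    intro acc h
    simp only [altStep, List.foldl_cons]
    split
    · exact ih _ (PySem.Set.nodup_add acc v h)
    · exact ih _ h

theorem nodup_altNew (adjList : List (Int × List Int)) (vis0 : PySem.Dict Int Bool)
    (comp frontier : PySem.Set Int) : (altNew adjList vis0 comp frontier).Nodup := by
  have aux : ∀ (f : List Int) (acc : PySem.Set Int), acc.Nodup →
      (f.foldl (fun acc w => altStep vis0 comp acc (altAdj adjList w)) acc).Nodup := by
    intro f
    induction f with
    | nil => intro acc h; exact h
    | cons w t ih => intro acc h; exact ih _ (nodup_altStep vis0 comp _ acc h)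
  exact aux frontier PySem.Set.empty List.nodup_nil

-- A's vis after marking exactly the vertices of c (in order), starting from the input dict
def pvVisOf (vis : List (Int × Bool)) (c : List Int) : PySem.Dict Int Bool :=
  c.foldl (fun d k => d.insert k true) (PySem.Dict.mk vis)

theorem get?_foldl_insert (c : List Int) : ∀ (d : PySem.Dict Int Bool) (x : Int),
    (c.foldl (fun d k => d.insert k true) d).get? x
      = if x ∈ c then some true else d.get? x := by
  induction c with
  | nil => intro d x; simp
  | cons k t ih =>
    intro d x
    simp only [List.foldl_cons]
    rw [ih]
    by_cases hxt : x ∈ t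
    · simp [hxt]
    · by_cases hxk : x = k
      · subst hxk
        simp [hxt, PySem.Dict.get?_insert_self]
      · simp only [hxt, if_false, List.mem_cons]
        rw [PySem.Dict.get?_insert_of_ne d true hxk]
        simp [hxk]

theorem pvVisOf_snoc (vis : List (Int × Bool)) (L : List Int) (v : Int) :
    pvVisOf vis (L ++ [v]) = (pvVisOf vis L).insert v true := by
  simp [pvVisOf, List.foldl_append]

-- degree sum over a list of vertices, as B computes it
def pvDegSum (adjList : List (Int × List Int)) (l : List Int) : Int :=
  (l.map (fun w => ((altAdj adjList w).length : Int))).sum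

theorem pvDegSum_append (adjList : List (Int × List Int)) (l l' : List Int) :
    pvDegSum adjList (l ++ l') = pvDegSum adjList l + pvDegSum adjList l' := by
  simp [pvDegSum]

-- one vertex of a level: A's inner for-loop = B's inner comprehension fold
theorem visit_align (vis : List (Int × Bool)) (c : List Int) (ns : List Int) :
    ∀ (acc f' : List Int),
      bfsVisit (pvVisOf vis (c ++ acc)) (f' ++ acc) ns
        = (pvVisOf vis (c ++ altStep (PySem.Dict.mk vis) c acc ns),
           f' ++ altStep (PySem.Dict.mk vis) c acc ns) := by
  induction ns with
  | nil => intro acc f'; simp [bfsVisit, altStep]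
  | cons v t ih =>
    intro acc f'
    simp only [bfsVisit, List.foldl_cons, altStep]
    have hget : ((pvVisOf vis (c ++ acc)).get? v).getD true
        = if v ∈ c ++ acc then true else ((PySem.Dict.mk vis).get? v).getD true := by
      rw [pvVisOf, get?_foldl_insert]
      split <;> simp
    by_cases hc : v ∈ c
    · -- v already in comp: both sides skip (B's condition fails on `v not in comp`)
      have hA : ¬ ((pvVisOf vis (c ++ acc)).get? v).getD true = false := by
        rw [hget, if_pos (List.mem_append.mpr (Or.inl hc))]; simp
      have hB : ¬ (PySem.Set.contains c v = false ∧
          ((PySem.Dict.mk vis).get? v).getD true = false) := by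
        rintro ⟨h1, -⟩
        simp only [PySem.Set.contains, List.contains_eq_mem, decide_eq_false_iff_not] at h1
        exact h1 hc
      rw [if_neg hA, if_neg hB]
      exact ih acc f'
    · by_cases hv : ((PySem.Dict.mk vis).get? v).getD true = false
      · have hB : PySem.Set.contains c v = false ∧
            ((PySem.Dict.mk vis).get? v).getD true = false := by
          constructor
          · simp only [PySem.Set.contains, List.contains_eq_mem, decide_eq_false_iff_not]
            exact hc
          · exact hv
        rw [if_pos hB]
        by_cases ha : v ∈ acc
        · -- already discovered this level: A skips, B's add is a no-op
          have hA : ¬ ((pvVisOf vis (c ++ acc)).get? v).getD true = false := by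
            rw [hget, if_pos (List.mem_append.mpr (Or.inr ha))]; simp
          have hadd : PySem.Set.add acc v = acc := by
            simp [PySem.Set.add, PySem.Set.contains, ha]
          rw [if_neg hA, hadd]
          exact ih acc f'
        · -- fresh vertex: both mark it
          have hA : ((pvVisOf vis (c ++ acc)).get? v).getD true = false := by
            rw [hget, if_neg (by simp [hc, ha])]; exact hv
          have hadd : PySem.Set.add acc v = acc ++ [v] := by
            simp [PySem.Set.add, PySem.Set.contains, ha]
          rw [if_pos hA, hadd]
          have h1 : (pvVisOf vis (c ++ acc)).insert v true = pvVisOf vis (c ++ (acc ++ [v])) := by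
            rw [← List.append_assoc, pvVisOf_snoc]
          have h2 : (f' ++ acc) ++ [v] = f' ++ (acc ++ [v]) := by
            rw [List.append_assoc]
          rw [h1, h2]
          exact ih (acc ++ [v]) f'
      · have hA : ¬ ((pvVisOf vis (c ++ acc)).get? v).getD true = false := by
          rw [hget]
          split
          · simp
          · exact hv
        have hB : ¬ (PySem.Set.contains c v = false ∧
            ((PySem.Dict.mk vis).get? v).getD true = false) := by
          rintro ⟨-, h2⟩; exact hv h2
        rw [if_neg hA, if_neg hB]
        exact ih acc f'

-- A runs through one whole level f (queue f ++ acc) = B's comprehension fold over f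
theorem level_align (adjList : List (Int × List Int)) (vis : List (Int × Bool)) (c : List Int) :
    ∀ (f acc : List Int) (ec vc : Int),
      bfsLoop adjList (f ++ acc) (pvVisOf vis (c ++ acc)) ec vc
        = bfsLoop adjList
            (f.foldl (fun a w => altStep (PySem.Dict.mk vis) c a (altAdj adjList w)) acc)
            (pvVisOf vis
              (c ++ f.foldl (fun a w => altStep (PySem.Dict.mk vis) c a (altAdj adjList w)) acc))
            (ec + pvDegSum adjList f) (vc + (f.length : Int)) := by
  intro f
  induction f with
  | nil => intro acc ec vc; simp [pvDegSum]
  | cons w f' ih =>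
    intro acc ec vc
    rw [List.cons_append, bfsLoop]
    have hadj : bfsAdj adjList w = altAdj adjList w := rfl
    rw [hadj, visit_align]
    rw [ih]
    simp only [List.foldl_cons, pvDegSum, List.map_cons, List.sum_cons, List.length_cons]
    have h1 : ec + ((altAdj adjList w).length : Int) + (f'.map (fun w => ((altAdj adjList w).length : Int))).sum
        = ec + (((altAdj adjList w).length : Int) + (f'.map (fun w => ((altAdj adjList w).length : Int))).sum) := by ring
    have h2 : vc + 1 + (f'.length : Int) = vc + ((f'.length + 1 : Nat) : Int) := by push_cast; ring
    rw [h1, h2]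

theorem union_fresh : ∀ (nf : List Int) (c : List Int), nf.Nodup →
    (∀ x ∈ nf, x ∉ c) → PySem.Set.union c nf = c ++ nf := by
  intro nf
  induction nf with
  | nil => intro c _ _; simp [PySem.Set.union, PySem.Set.update]
  | cons x t ih =>
    intro c hno hf
    have hxc : x ∉ c := hf x List.mem_cons_self
    have hadd : PySem.Set.add c x = c ++ [x] := by
      simp [PySem.Set.add, PySem.Set.contains, hxc]
    have hstep : PySem.Set.union c (x :: t) = PySem.Set.union (c ++ [x]) t := by
      simp [PySem.Set.union, PySem.Set.update, List.foldl_cons, hadd]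
    rw [hstep, ih (c ++ [x]) (List.Nodup.of_cons hno)]
    · simp
    · intro y hy
      simp only [List.mem_append, List.mem_singleton]
      rintro (hyc | rfl)
      · exact hf y (List.mem_cons_of_mem x hy) hyc
      · exact (List.nodup_cons.mp hno).1 hy

theorem main_align (adjList : List (Int × List Int)) (vis : List (Int × Bool)) :
    ∀ (f c : PySem.Set Int), ∃ Δ : List Int,
      altLoop adjList vis f c = c ++ Δ ∧
      ∀ (ec vc : Int), bfsLoop adjList f (pvVisOf vis c) ec vc
        = (ec + pvDegSum adjList f + pvDegSum adjList Δ,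
           vc + (f.length : Int) + (Δ.length : Int)) := by
  intro f c
  induction f, c using altLoop.induct adjList vis with
  | case1 c =>
    refine ⟨[], ?_, ?_⟩
    · rw [altLoop]; simp
    · intro ec vc
      rw [bfsLoop]
      simp [pvDegSum]
  | case2 comp fh ft nf ih =>
    obtain ⟨Δ', hA', hB'⟩ := ih
    have hfresh : ∀ x ∈ nf, x ∉ comp := by
      intro x hx
      have h1 := (mem_altNew adjList (PySem.Dict.mk vis) comp (fh :: ft) x hx).1
      simp only [PySem.Set.contains, List.contains_eq_mem, decide_eq_false_iff_not] at h1
      exact h1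
    have hnd : nf.Nodup := nodup_altNew adjList (PySem.Dict.mk vis) comp (fh :: ft)
    have hun : PySem.Set.union comp nf = comp ++ nf :=
      union_fresh nf comp hnd hfresh
    have hstep : altLoop adjList vis (fh :: ft) comp
        = altLoop adjList vis nf (PySem.Set.union comp nf) := by
      rw [altLoop]
    refine ⟨nf ++ Δ', ?_, ?_⟩
    · rw [hstep, hA', hun, List.append_assoc]
    · intro ec vc
      have hl := level_align adjList vis comp (fh :: ft) [] ec vc
      rw [List.append_nil, List.append_nil] at hl
      have hnf : (fh :: ft).foldl
          (fun a w => altStep (PySem.Dict.mk vis) comp a (altAdj adjList w)) [] = nf := rfl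
      rw [hnf] at hl
      rw [hun] at hB'
      rw [hl, hB' (ec + pvDegSum adjList (fh :: ft)) (vc + ((fh :: ft).length : Int))]
      rw [pvDegSum_append, List.length_append]
      simp only [Prod.mk.injEq]
      constructor
      · ring
      · push_cast
        ring

-- ===== VERDICT (by name: the statement is the Claim_ definition above) =====
theorem bfs_spec : Claim_equal_bfs := by
  intro u adjList vis _ _
  unfold Spec_bfs
  obtain ⟨Δ, hA, hB⟩ := main_align adjList vis
    (PySem.Set.add PySem.Set.empty u) (PySem.Set.add PySem.Set.empty u)
  have hset : (PySem.Set.add PySem.Set.empty u : List Int) = [u] := rfl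
  rw [hset] at hA hB
  have hvis1 : (PySem.Dict.mk vis).insert u true = pvVisOf vis [u] := rfl
  simp only [bfs, bfs_alt, hset, hvis1, hA, hB 0 0]
  have he : ((([u] ++ Δ).map (fun w => ((altAdj adjList w).length : Int))).sum : Int)
      = 0 + pvDegSum adjList [u] + pvDegSum adjList Δ := by
    rw [show (([u] ++ Δ).map (fun w => ((altAdj adjList w).length : Int))).sum
        = pvDegSum adjList ([u] ++ Δ) from rfl, pvDegSum_append]
    simp [pvDegSum]
  have hn : ((([u] ++ Δ).length : Nat) : Int) = 0 + 1 + (Δ.length : Int) := by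
    simp only [List.length_append, List.length_cons, List.length_nil]
    push_cast
    ring
  rw [he, hn]
  norm_num
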